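-- pv_equiv track=rewrite | github.com/sljeff/chandra_client | chandra/model/util.py | detect_repeat_token
-- ===== SOURCE A (Python) =====
-- def detect_repeat_token(
--     predicted_tokens: str, max_repeats: int = 4, window_size: int = 50
-- ):
--     if len(predicted_tokens) < window_size:
--         return False
--
--     # Look at the last window_size tokens
--     recent_tokens = predicted_tokens[-window_size:].lower()
--
--     # Try different sequence lengths (1 to window_size//2)
--     for seq_len in range(1, window_size // 2 + 1):
--         # Skip if we can't fit enough repetitions
--         if seq_len * (max_repeats + 1) > window_size:
--             continue
--
--         # Extract the potential repeating sequence from the end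
--         candidate_seq = recent_tokens[-seq_len:]
--
--         # Count how many times this sequence appears consecutively at the end
--         repeat_count = 0
--         pos = len(recent_tokens) - seq_len
--
--         while pos >= 0:
--             if recent_tokens[pos : pos + seq_len] == candidate_seq:
--                 repeat_count += 1
--                 pos -= seq_len
--             else:
--                 break
--
--         # If we found more than max_repeats consecutive occurrences
--         if repeat_count > max_repeats:
--             return True
--
--     return False
-- ===== SOURCE B (Python) =====
-- def detect_repeat_token(
--     predicted_tokens: str, max_repeats: int = 4, window_size: int = 50
-- ):
--     if len(predicted_tokens) < window_size:
--         return False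
--
--     # Reversed window: a trailing run of period L becomes a leading one.
--     t = predicted_tokens[-window_size:].lower()[::-1]
--
--     # The window ends with some length-L block repeated max_repeats+1 times
--     # exactly when the reversed window is L-periodic over its first
--     # L*(max_repeats+1) characters, i.e. it agrees with its own L-shift on
--     # the first L*max_repeats positions (the standard self-overlap trick).
--     for L in range(1, window_size // 2 + 1):
--         if L * (max_repeats + 1) > window_size:
--             continue
--         if all(t[i] == t[i + L] for i in range(L * max_repeats)):
--             return True
--     return False
-- ===== Notes on version B (the rewrite author's own statement) =====
-- stated objective: alternative
-- what changed: B reverses the window once and, for each period L, tests L-periodicity of the tail by comparing the reversed window with its own L-shift position-by-position (the self-overlap trick), instead of A's extraction of a candidate suffix and backwards block-by-block counting of its consecutive occurrences.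
import Mathlib
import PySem

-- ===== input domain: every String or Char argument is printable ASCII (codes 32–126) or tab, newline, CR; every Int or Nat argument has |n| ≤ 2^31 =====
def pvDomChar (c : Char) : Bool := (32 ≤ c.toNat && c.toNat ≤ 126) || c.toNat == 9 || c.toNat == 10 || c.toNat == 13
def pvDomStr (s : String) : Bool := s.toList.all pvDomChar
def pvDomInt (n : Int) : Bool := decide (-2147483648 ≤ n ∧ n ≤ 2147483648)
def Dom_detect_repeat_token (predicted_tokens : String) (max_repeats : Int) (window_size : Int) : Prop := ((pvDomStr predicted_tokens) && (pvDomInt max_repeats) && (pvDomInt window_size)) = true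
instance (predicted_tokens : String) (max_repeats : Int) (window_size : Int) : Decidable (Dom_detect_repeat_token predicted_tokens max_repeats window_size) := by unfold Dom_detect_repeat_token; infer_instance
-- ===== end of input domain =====

-- B reverses the window once and tests L-periodicity of its head by comparing it with its
-- own L-shift, instead of A's candidate extraction and backwards block-counting (objective: alternative).

-- ===== PORT A =====
-- the inner `while pos >= 0` counting loop of A; fuel = recent.length + 1 suffices since pos
-- starts at length - seq_len and strictly decreases by seq_len ≥ 1 each iteration
def pvCountLoop (r cand : List Char) (L : Int) : Nat → Int → Nat
  | 0, _ => 0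
  | fuel + 1, pos =>
    if 0 ≤ pos then
      if PySem.List.slice r (some pos) (some (pos + L)) = cand then
        pvCountLoop r cand L fuel (pos - L) + 1
      else 0
    else 0

-- A's `for seq_len in range(...)` loop with early return
def pvOuterA (r : List Char) (mr ws : Int) : List Int → Bool
  | [] => false
  | L :: rest =>
    if L * (mr + 1) > ws then pvOuterA r mr ws rest
    else
      let cand := PySem.List.slice r (some (-L)) none
      if (pvCountLoop r cand L (r.length + 1) ((r.length : Int) - L) : Int) > mr then true
      else pvOuterA r mr ws rest

def detect_repeat_token (predicted_tokens : String) (max_repeats : Int) (window_size : Int) : Bool :=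
  if PySem.Str.len predicted_tokens < window_size then false
  else
    let recent := PySem.Chars.lower (PySem.List.slice predicted_tokens.toList (some (-window_size)) none)
    pvOuterA recent max_repeats window_size
      (PySem.List.pyRange 1 (PySem.Int.floordiv window_size 2 + 1) 1)

-- ===== PORT B =====
-- `[::-1]` is List.reverse (PySem.List.slice?_none_none_neg_one); `t[i]` is pyGet? (always in
-- range here); the generator `all(...)` over range(L*max_repeats) is List.all over pyRange.
def detect_repeat_token_alt (predicted_tokens : String) (max_repeats : Int) (window_size : Int) : Bool :=
  if PySem.Str.len predicted_tokens < window_size then false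
  else
    let t := (PySem.Chars.lower (PySem.List.slice predicted_tokens.toList (some (-window_size)) none)).reverse
    (PySem.List.pyRange 1 (PySem.Int.floordiv window_size 2 + 1) 1).any (fun L =>
      !decide (L * (max_repeats + 1) > window_size) &&
      (PySem.List.pyRange 0 (L * max_repeats) 1).all (fun i =>
        PySem.List.pyGet? t i == PySem.List.pyGet? t (i + L)))

-- ===== PRECONDITION & SPEC =====
def Spec_detect_repeat_token (predicted_tokens : String) (max_repeats : Int) (window_size : Int) (out : Bool) : Prop := out = detect_repeat_token_alt predicted_tokens max_repeats window_size
instance (predicted_tokens : String) (max_repeats : Int) (window_size : Int) (out : Bool) : Decidable (Spec_detect_repeat_token predicted_tokens max_repeats window_size out) := by unfold Spec_detect_repeat_token; infer_instance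

-- ===== CLAIM (what is proved, stated in full; the proofs are below) =====
def Claim_equal_detect_repeat_token : Prop := ∀ (predicted_tokens : String) (max_repeats : Int) (window_size : Int), Dom_detect_repeat_token predicted_tokens max_repeats window_size → Spec_detect_repeat_token predicted_tokens max_repeats window_size (detect_repeat_token predicted_tokens max_repeats window_size)

-- ===== LEMMAS AND PROOFS =====

theorem pvCountLoop_take (r cand : List Char) (ℓ : Nat) (hℓ : 0 < ℓ) (m : Nat) :
    ∀ (fuel : Nat) (pos : Int), pos + (ℓ : Int) ≤ (m : Int) →
      pvCountLoop r cand (ℓ : Int) fuel pos = pvCountLoop (r.take m) cand (ℓ : Int) fuel pos := by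
  intro fuel
  induction fuel with
  | zero => intro pos h; rfl
  | succ f ih =>
    intro pos h
    simp only [pvCountLoop]
    by_cases hp : 0 ≤ pos
    · have hslice : PySem.List.slice r (some pos) (some (pos + (ℓ : Int))) =
          PySem.List.slice (r.take m) (some pos) (some (pos + (ℓ : Int))) := by
        rw [PySem.List.slice_toNat r hp (by omega), PySem.List.slice_toNat (r.take m) hp (by omega)]
        rw [List.drop_take]
        rw [List.take_take]
        congr 1
        omega
      rw [hslice]
      simp only [hp, if_true]
      rw [ih (pos - ℓ) (by omega)]
    · simp [hp]

theorem pv_suffix_append_iff (xs cand r : List Char) (hsuf : cand <:+ r) :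
    (xs ++ cand <:+ r) ↔ xs <:+ r.take (r.length - cand.length) := by
  obtain ⟨w, hw⟩ := hsuf
  have hwl : w.length = r.length - cand.length := by
    subst hw; simp
  have htake : r.take (r.length - cand.length) = w := by
    rw [← hwl, ← hw, List.take_left]
  rw [htake]
  constructor
  · rintro ⟨u, hu⟩
    have h2 : (u ++ xs) ++ cand = w ++ cand := by rw [hw, ← hu]; simp
    exact ⟨u, List.append_cancel_right h2⟩
  · rintro ⟨u, hu⟩
    exact ⟨u, by rw [← hw, ← hu]; simp⟩

theorem pv_flatten_comm (xs : List Char) : ∀ k : Nat,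
    xs ++ (List.replicate k xs).flatten = (List.replicate k xs).flatten ++ xs := by
  intro k
  induction k with
  | zero => simp
  | succ n ih =>
    rw [List.replicate_succ, List.flatten_cons]
    calc xs ++ (xs ++ (List.replicate n xs).flatten)
        = xs ++ ((List.replicate n xs).flatten ++ xs) := by rw [ih]
      _ = (xs ++ (List.replicate n xs).flatten) ++ xs := by rw [List.append_assoc]

theorem pv_flatten_replicate_succ (k : Nat) (xs : List Char) :
    (List.replicate (k + 1) xs).flatten = (List.replicate k xs).flatten ++ xs := by
  rw [List.replicate_succ, List.flatten_cons, pv_flatten_comm]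

theorem pvCount_iff_suffix (ℓ : Nat) (hℓ : 0 < ℓ) (cand : List Char) (hc : cand.length = ℓ) :
    ∀ (k : Nat) (r : List Char) (fuel : Nat), r.length + 1 ≤ fuel →
      (k ≤ pvCountLoop r cand (ℓ : Int) fuel ((r.length : Int) - ℓ) ↔
        (List.replicate k cand).flatten <:+ r) := by
  intro k
  induction k with
  | zero =>
    intro r fuel hfuel
    simp [List.nil_suffix]
  | succ k ih =>
    intro r fuel hfuel
    cases fuel with
    | zero => omega
    | succ f =>
      by_cases hp : 0 ≤ (r.length : Int) - ℓ
      · have hln : ℓ ≤ r.length := by omega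
        have hslice : PySem.List.slice r (some ((r.length : Int) - ℓ))
            (some ((r.length : Int) - ℓ + ℓ)) = r.drop (r.length - ℓ) := by
          rw [PySem.List.slice_toNat r hp (by omega)]
          have h1 : ((r.length : Int) - ℓ).toNat = r.length - ℓ := by omega
          rw [h1]
          have h2 : ((r.length : Int) - ℓ + ℓ).toNat - (r.length - ℓ) = ℓ := by omega
          rw [h2]
          exact List.take_of_length_le (by simp [List.length_drop]; omega)
        by_cases hd : r.drop (r.length - ℓ) = cand
        · have hsuf : cand <:+ r := ⟨r.take (r.length - ℓ), by rw [← hd]; exact List.take_append_drop _ r⟩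
          simp only [pvCountLoop, hp, if_true, hslice, hd, if_true]
          have harg : (r.length : Int) - ℓ - ℓ = ((r.take (r.length - ℓ)).length : Int) - ℓ := by
            simp [List.length_take]; omega
          rw [pvCountLoop_take r cand ℓ hℓ (r.length - ℓ) f ((r.length : Int) - ℓ - ℓ) (by omega)]
          rw [harg]
          rw [Nat.add_le_add_iff_right]
          rw [ih (r.take (r.length - ℓ)) f (by simp [List.length_take]; omega)]
          rw [pv_flatten_replicate_succ, pv_suffix_append_iff _ cand r hsuf, hc]
        · simp only [pvCountLoop, hp, if_true, hslice, hd, if_false]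
          constructor
          · intro h; omega
          · intro h
            exfalso
            rw [pv_flatten_replicate_succ] at h
            have hsuf : cand <:+ r := (List.suffix_append _ cand).trans h
            obtain ⟨t, ht⟩ := hsuf
            have htl : t.length = r.length - ℓ := by
              have := congrArg List.length ht
              simp [hc] at this
              omega
            exact hd (by rw [← htl, ← ht, List.drop_left])
      · have hcount : pvCountLoop r cand (ℓ : Int) (f + 1) ((r.length : Int) - ℓ) = 0 := by
          simp only [pvCountLoop, hp, if_false]
        rw [hcount]
        constructor
        · intro h; omega
        · intro h
          have hlen := h.length_le
          have h2 : ((List.replicate (k + 1) cand).flatten).length = (k + 1) * ℓ := by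
            simp [hc, Nat.mul_comm]
          have h3 : ℓ ≤ (k + 1) * ℓ := Nat.le_mul_of_pos_left _ (by omega)
          omega

-- reverse of a repeated block is the repeated block of the reverse
theorem pv_flatten_reverse (cand : List Char) : ∀ k : Nat,
    ((List.replicate k cand).flatten).reverse = (List.replicate k cand.reverse).flatten := by
  intro k
  induction k with
  | zero => simp
  | succ n ih =>
    rw [List.replicate_succ, List.flatten_cons, List.reverse_append, ih,
        List.replicate_succ, List.flatten_cons, pv_flatten_comm]

theorem pv_revcand_eq (r : List Char) (ℓ : Nat) (h : ℓ ≤ r.length) :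
    (r.drop (r.length - ℓ)).reverse = r.reverse.take ℓ := by
  rw [List.reverse_drop]
  congr 1
  omega

-- indexing into a repeated block
theorem pv_getElem_flatten_rep (s : List Char) :
    ∀ (k j : Nat), j < k * s.length → (List.replicate k s).flatten[j]? = s[j % s.length]? := by
  intro k
  induction k with
  | zero =>
    intro j hj
    rw [Nat.zero_mul] at hj
    omega
  | succ k ih =>
    intro j hj
    rw [List.replicate_succ, List.flatten_cons]
    by_cases h : j < s.length
    · rw [List.getElem?_append_left h, Nat.mod_eq_of_lt h]
    · rw [List.getElem?_append_right (Nat.le_of_not_lt h)]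
      replace h := Nat.le_of_not_lt h
      have hm : (k+1) * s.length = k * s.length + s.length := by ring
      have hj' : j - s.length < k * s.length := by omega
      rw [ih _ hj']
      have hmod : (j - s.length) % s.length = j % s.length := by
        conv_rhs => rw [show j = (j - s.length) + s.length from by omega]
        rw [Nat.add_mod_right]
      rw [hmod]

-- a list starts with its own length-ℓ head repeated m+1 times iff it agrees with its ℓ-shift
-- on the first ℓ*m positions
theorem pv_prefix_iff_shift (t : List Char) (ℓ m : Nat) (hℓ : 0 < ℓ)
    (hlen : ℓ * (m + 1) ≤ t.length) :
    ((List.replicate (m + 1) (t.take ℓ)).flatten <+: t) ↔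
      (∀ i : Nat, i < ℓ * m → t[i]? = t[i + ℓ]?) := by
  have hle : ℓ ≤ t.length := by
    have := Nat.le_mul_of_pos_right ℓ (show 0 < m + 1 by omega)
    omega
  have hsl : (t.take ℓ).length = ℓ := by simp; omega
  have hflen : ((List.replicate (m + 1) (t.take ℓ)).flatten).length = (m + 1) * ℓ := by
    simp [hsl, Nat.mul_comm]
  have hval : ∀ j, j < (m + 1) * ℓ →
      ((List.replicate (m + 1) (t.take ℓ)).flatten)[j]? = t[j % ℓ]? := by
    intro j hj
    rw [pv_getElem_flatten_rep (t.take ℓ) (m + 1) j (by rw [hsl]; exact hj)]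
    rw [hsl]
    exact List.getElem?_take_of_lt (Nat.mod_lt j hℓ)
  constructor
  · intro hp i hi
    rw [List.prefix_iff_getElem?] at hp
    have hper : ∀ j, j < (m + 1) * ℓ → t[j]? = t[j % ℓ]? := by
      intro j hj
      have hj' : j < ((List.replicate (m + 1) (t.take ℓ)).flatten).length := by rw [hflen]; exact hj
      calc t[j]? = some ((List.replicate (m + 1) (t.take ℓ)).flatten)[j] := hp j hj'
        _ = ((List.replicate (m + 1) (t.take ℓ)).flatten)[j]? := (List.getElem?_eq_getElem hj').symm
        _ = t[j % ℓ]? := hval j hj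
    have hms : ℓ * (m + 1) = ℓ * m + ℓ := by ring
    have hms' : (m + 1) * ℓ = ℓ * m + ℓ := by ring
    have h1 := hper i (by omega)
    have h2 := hper (i + ℓ) (by omega)
    rw [h1, h2, Nat.add_mod_right]
  · intro hs
    have hper : ∀ j, j < ℓ * m + ℓ → t[j]? = t[j % ℓ]? := by
      intro j
      induction j using Nat.strong_induction_on with
      | _ j ih =>
        intro hj
        by_cases hjl : j < ℓ
        · rw [Nat.mod_eq_of_lt hjl]
        · replace hjl := Nat.le_of_not_lt hjl
          have hi : j - ℓ < ℓ * m := by omega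
          have hshift := hs (j - ℓ) hi
          have hj2 : j - ℓ + ℓ = j := by omega
          rw [hj2] at hshift
          have hrec := ih (j - ℓ) (by omega) (by omega)
          rw [← hshift, hrec]
          have hmod : (j - ℓ) % ℓ = j % ℓ := by
            conv_rhs => rw [show j = (j - ℓ) + ℓ from by omega]
            rw [Nat.add_mod_right]
          rw [hmod]
    rw [List.prefix_iff_getElem?]
    intro j hjlt
    have hj : j < (m + 1) * ℓ := by rw [hflen] at hjlt; exact hjlt
    have hms : (m + 1) * ℓ = ℓ * m + ℓ := by ring
    have e4 : t[j]? = t[j % ℓ]? := hper j (by omega)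
    have e1 : ((List.replicate (m + 1) (t.take ℓ)).flatten)[j]? =
        some ((List.replicate (m + 1) (t.take ℓ)).flatten)[j] := List.getElem?_eq_getElem hjlt
    rw [e4, ← hval j hj, e1]

-- B's `all(...)` over range(ℓ*m) as a ∀ over Nat indices
theorem pv_all_iff (t : List Char) (ℓ m : Nat) :
    (((PySem.List.pyRange 0 ((ℓ : Int) * (m : Int)) 1).all (fun i =>
        PySem.List.pyGet? t i == PySem.List.pyGet? t (i + (ℓ : Int)))) = true) ↔
      (∀ i : Nat, i < ℓ * m → t[i]? = t[i + ℓ]?) := by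
  rw [List.all_eq_true]
  constructor
  · intro h i hi
    have hm : (i : Int) ∈ PySem.List.pyRange 0 ((ℓ : Int) * (m : Int)) 1 := by
      rw [PySem.List.mem_pyRange_one]
      constructor
      · positivity
      · exact_mod_cast hi
    have hb := h _ hm
    have h2 : (i : Int) + (ℓ : Int) = ((i + ℓ : Nat) : Int) := by push_cast; ring
    rw [h2] at hb
    simp only [PySem.List.pyGet?_natCast] at hb
    rwa [beq_iff_eq] at hb
  · intro h x hx
    rw [PySem.List.mem_pyRange_one] at hx
    obtain ⟨h0, hlt⟩ := hx
    lift x to ℕ using h0 with i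
    have hi : i < ℓ * m := by exact_mod_cast hlt
    have h2 : (i : Int) + (ℓ : Int) = ((i + ℓ : Nat) : Int) := by push_cast; ring
    rw [h2]
    simp only [PySem.List.pyGet?_natCast]
    rw [beq_iff_eq]
    exact h i hi

theorem pv_elem_eq (r : List Char) (mr ws : Int) (L : Int) (ℓ : Nat)
    (hL : L = (ℓ : Int)) (hℓ : 0 < ℓ) (hn : 2 * ℓ ≤ r.length) (hws : (r.length : Int) = ws) :
    (if L * (mr + 1) > ws then false
     else decide (((pvCountLoop r (PySem.List.slice r (some (-L)) none) L (r.length + 1)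
         ((r.length : Int) - L) : Nat) : Int) > mr))
    = (!decide (L * (mr + 1) > ws) &&
       (PySem.List.pyRange 0 (L * mr) 1).all (fun i =>
         PySem.List.pyGet? r.reverse i == PySem.List.pyGet? r.reverse (i + L))) := by
  subst hL
  by_cases hskip : (ℓ : Int) * (mr + 1) > ws
  · simp [hskip]
  · have hle : (ℓ : Int) * (mr + 1) ≤ ws := not_lt.mp hskip
    rw [if_neg hskip]
    have hdec : (!decide ((ℓ : Int) * (mr + 1) > ws)) = true := by simp [hskip]
    rw [hdec, Bool.true_and]
    have hcand : PySem.List.slice r (some (-(ℓ : Int))) none = r.drop (r.length - ℓ) :=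
      PySem.List.slice_from_neg_natCast r ℓ hℓ
    have hcl : (r.drop (r.length - ℓ)).length = ℓ := by simp; omega
    rw [hcand]
    by_cases hmr : 0 ≤ mr
    · set m := mr.toNat with hm
      have hmr' : mr = (m : Int) := by omega
      have hlen : ℓ * (m + 1) ≤ r.length := by
        have hcast : ((ℓ * (m + 1) : Nat) : Int) = (ℓ : Int) * (mr + 1) := by
          rw [hmr']; push_cast; ring
        omega
      have hiff := pvCount_iff_suffix ℓ hℓ (r.drop (r.length - ℓ)) hcl (m + 1) r (r.length + 1)
        (le_refl _)
      have hbridge : ((List.replicate (m + 1) (r.drop (r.length - ℓ))).flatten <:+ r)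
          ↔ ((List.replicate (m + 1) (r.reverse.take ℓ)).flatten <+: r.reverse) := by
        rw [← pv_revcand_eq r ℓ (by omega), ← pv_flatten_reverse, List.reverse_prefix]
      have hper := pv_prefix_iff_shift r.reverse ℓ m hℓ (by simp; omega)
      have hall := pv_all_iff r.reverse ℓ m
      rw [hmr']
      by_cases hs : ∀ i : Nat, i < ℓ * m → r.reverse[i]? = r.reverse[i + ℓ]?
      · have hcount := hiff.mpr (hbridge.mpr (hper.mpr hs))
        have hgt : ((pvCountLoop r (r.drop (r.length - ℓ)) (ℓ : Int) (r.length + 1)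
            ((r.length : Int) - ℓ) : Nat) : Int) > (m : Int) := by omega
        simp [hgt, hall.mpr hs]
      · have hnc : ¬ (m + 1 ≤ pvCountLoop r (r.drop (r.length - ℓ)) (ℓ : Int) (r.length + 1)
            ((r.length : Int) - ℓ)) := fun hc => hs (hper.mp (hbridge.mp (hiff.mp hc)))
        have hng : ¬ (((pvCountLoop r (r.drop (r.length - ℓ)) (ℓ : Int) (r.length + 1)
            ((r.length : Int) - ℓ) : Nat) : Int) > (m : Int)) := by omega
        have hf : ((PySem.List.pyRange 0 ((ℓ : Int) * (m : Int)) 1).all (fun i =>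
            PySem.List.pyGet? r.reverse i == PySem.List.pyGet? r.reverse (i + (ℓ : Int)))) = false := by
          rw [← Bool.not_eq_true]
          intro hc
          exact hs (hall.mp hc)
        simp [hng, hf]
    · -- max_repeats < 0: the candidate suffix alone already gives count ≥ 1 > mr, and B's range is empty
      have hneg : (ℓ : Int) * mr ≤ 0 :=
        mul_nonpos_of_nonneg_of_nonpos (by positivity) (by omega)
      have hrange : PySem.List.pyRange 0 ((ℓ : Int) * mr) 1 = [] :=
        PySem.List.pyRange_one_eq_nil hneg
      have hsufc : r.drop (r.length - ℓ) <:+ r := ⟨r.take (r.length - ℓ), List.take_append_drop _ r⟩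
      have hone := pvCount_iff_suffix ℓ hℓ (r.drop (r.length - ℓ)) hcl 1 r (r.length + 1) (le_refl _)
      have hsuf1 : (List.replicate 1 (r.drop (r.length - ℓ))).flatten <:+ r := by simpa using hsufc
      have hcount : 1 ≤ pvCountLoop r (r.drop (r.length - ℓ)) (ℓ : Int) (r.length + 1)
          ((r.length : Int) - ℓ) := hone.mpr hsuf1
      have hgt : ((pvCountLoop r (r.drop (r.length - ℓ)) (ℓ : Int) (r.length + 1)
          ((r.length : Int) - ℓ) : Nat) : Int) > mr := by omega
      simp [hgt, hrange]

theorem pv_outer_eq (r : List Char) (mr ws : Int) (hws : (r.length : Int) = ws) :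
    ∀ l : List Int, (∀ L ∈ l, 1 ≤ L ∧ L * 2 ≤ (r.length : Int)) →
      pvOuterA r mr ws l = l.any (fun L =>
        !decide (L * (mr + 1) > ws) &&
        (PySem.List.pyRange 0 (L * mr) 1).all (fun i =>
          PySem.List.pyGet? r.reverse i == PySem.List.pyGet? r.reverse (i + L))) := by
  intro l
  induction l with
  | nil => intro _; rfl
  | cons a l ih =>
    intro h
    obtain ⟨ha1, ha2⟩ := h a List.mem_cons_self
    have hL : a = ((a.toNat : Nat) : Int) := by omega
    have hℓ : 0 < a.toNat := by omega
    have hn : 2 * a.toNat ≤ r.length := by omega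
    rw [List.any_cons]
    rw [← pv_elem_eq r mr ws a a.toNat hL hℓ hn hws]
    rw [← ih (fun L hm => h L (List.mem_cons_of_mem _ hm))]
    simp only [pvOuterA]
    split_ifs with h1 h2
    · simp
    · simp [h2]
    · simp [h2]

-- ===== VERDICT (by name: the statement is the Claim_ definition above) =====
theorem detect_repeat_token_spec : Claim_equal_detect_repeat_token := by
  intro p mr ws _
  unfold Spec_detect_repeat_token detect_repeat_token detect_repeat_token_alt
  by_cases hg : PySem.Str.len p < ws
  · simp only [if_pos hg]
  · simp only [hg, if_false]
    have hlenp : PySem.Str.len p = (p.toList.length : Int) := PySem.Str.len_eq p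
    have hlen : ws ≤ (p.toList.length : Int) := by rw [← hlenp]; exact not_lt.mp hg
    by_cases hws2 : 2 ≤ ws
    · have hwsn : ws = ((ws.toNat : Nat) : Int) := by omega
      have hsl : PySem.List.slice p.toList (some (-ws)) none
          = p.toList.drop (p.toList.length - ws.toNat) := by
        rw [hwsn]; exact PySem.List.slice_from_neg_natCast _ _ (by omega)
      have hrl : (PySem.Chars.lower (PySem.List.slice p.toList (some (-ws)) none)).length
          = ws.toNat := by
        simp [PySem.Chars.lower, hsl]
        have hx : p.toList.length = p.length := by simp
        omega
      apply pv_outer_eq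
      · rw [hrl]; omega
      · intro L hm
        rw [PySem.List.mem_pyRange_one] at hm
        obtain ⟨h1, h2⟩ := hm
        have hfd : L ≤ PySem.Int.floordiv ws 2 := by omega
        have hL2 : L * 2 ≤ ws := (PySem.Int.le_floordiv_iff_mul_le (by norm_num)).mp hfd
        refine ⟨h1, ?_⟩
        rw [hrl]; omega
    · -- ws ≤ 1: the range 1 .. ws//2 is empty, both sides are false
      have hfd : PySem.Int.floordiv ws 2 + 1 ≤ 1 := by
        have := (PySem.Int.floordiv_lt_iff_lt_mul (a := ws) (b := 2) (q := 1) (by norm_num)).mpr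
          (by omega)
        omega
      rw [PySem.List.pyRange_one_eq_nil hfd]
      rfl
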